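-- pv_equiv track=rewrite | github.com/rustic-ai/kniv-nlp-models | corpus/pipeline/gold_filter.py | build_ner_prompt
-- ===== SOURCE A (Python) =====
-- def build_ner_prompt(text: str, tokens: list[str], ner_tags: list[str]) -> str | None:
--     """Build NER validation prompt from BIO tags. Returns None if no entities."""
--     # Extract entity spans from BIO tags
--     entities = []
--     i = 0
--     while i < len(ner_tags):
--         if ner_tags[i].startswith("B-"):
--             etype = ner_tags[i][2:]
--             ew = [tokens[i]]
--             j = i + 1
--             while j < len(ner_tags) and ner_tags[j] == f"I-{etype}":
--                 ew.append(tokens[j])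
--                 j += 1
--             entities.append((" ".join(ew), etype))
--             i = j
--         else:
--             i += 1
--
--     if not entities:
--         return None
--
--     text = text[:500]
--     entities = entities[:10]
--
--     if len(entities) == 1:
--         name, etype = entities[0]
--         return (
--             f'Sentence: "{text}"\n'
--             f'The phrase "{name}" is tagged as entity type {etype}.\n'
--             f"Is this entity type correct? Answer only: correct or incorrect."
--         )
--     ent_list = ", ".join(f'"{n}" -> {t}' for n, t in entities)
--     return (
--         f'Sentence: "{text}"\n'
--         f"Entities: {ent_list}\n"
--         f"Are all entity labels correct? Answer only: correct or incorrect."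
--     )
-- ===== SOURCE B (Python) =====
-- def build_ner_prompt(text: str, tokens: list[str], ner_tags: list[str]) -> str | None:
--     """Build NER validation prompt from BIO tags. Returns None if no entities."""
--     # Single for-loop over enumerate(ner_tags) with a running accumulator
--     # (current entity type + its tokens), flushed on boundaries.
--     entities = []
--     cur_type = None
--     cur_tokens = []
--     for i, tag in enumerate(ner_tags):
--         if tag.startswith("B-"):
--             if cur_type is not None:
--                 entities.append((" ".join(cur_tokens), cur_type))
--             cur_type = tag[2:]
--             cur_tokens = [tokens[i]]
--         elif cur_type is not None and tag == "I-" + cur_type: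
--             cur_tokens.append(tokens[i])
--         else:
--             if cur_type is not None:
--                 entities.append((" ".join(cur_tokens), cur_type))
--             cur_type = None
--             cur_tokens = []
--     if cur_type is not None:
--         entities.append((" ".join(cur_tokens), cur_type))
--
--     if not entities:
--         return None
--
--     text = text[:500]
--     entities = entities[:10]
--
--     if len(entities) == 1:
--         name, etype = entities[0]
--         return (
--             f'Sentence: "{text}"\n'
--             f'The phrase "{name}" is tagged as entity type {etype}.\n'
--             f"Is this entity type correct? Answer only: correct or incorrect."
--         )
--     ent_list = ", ".join(f'"{n}" -> {t}' for n, t in entities)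
--     return (
--         f'Sentence: "{text}"\n'
--         f"Entities: {ent_list}\n"
--         f"Are all entity labels correct? Answer only: correct or incorrect."
--     )
-- ===== Notes on version B (the rewrite author's own statement) =====
-- stated objective: simpler
-- what changed: Replaces A's nested two-pointer while-loops (outer scan plus inner I-tag consumer that jumps the outer index) by a single for-loop over enumerate(ner_tags) maintaining a running open-entity accumulator (current type + tokens) that is flushed on entity boundaries and once after the loop.
import Mathlib
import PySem

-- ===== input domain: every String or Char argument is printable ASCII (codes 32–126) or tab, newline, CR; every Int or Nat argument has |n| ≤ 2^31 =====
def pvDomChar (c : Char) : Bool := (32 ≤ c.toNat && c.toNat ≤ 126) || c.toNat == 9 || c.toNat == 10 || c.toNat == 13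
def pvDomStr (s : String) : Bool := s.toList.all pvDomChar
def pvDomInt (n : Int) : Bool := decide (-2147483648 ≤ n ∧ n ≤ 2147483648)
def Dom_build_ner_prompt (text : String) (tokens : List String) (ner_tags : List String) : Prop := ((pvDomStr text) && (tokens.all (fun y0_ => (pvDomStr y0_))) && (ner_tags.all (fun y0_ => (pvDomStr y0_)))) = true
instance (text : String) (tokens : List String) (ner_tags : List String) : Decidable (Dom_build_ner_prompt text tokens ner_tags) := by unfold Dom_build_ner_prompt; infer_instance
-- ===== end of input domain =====

-- B replaces A's two-pointer outer/inner-while BIO parse by a single fold over enumerate(ner_tags)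
-- maintaining an open-entity accumulator (objective: simpler decomposition; same cost).

-- ===== PORT A =====
-- Inner while loop of A: collect tokens while ner_tags[j] == "I-"+etype.
-- tokens[j] is ported as pyGetD tokens j "": under Pre_ every such index is in range, so this is exact.
def spanA (tokens ner_tags : List String) (etype : String) (ws : List String) (j : Nat) : List String × Nat :=
  if _h : j < ner_tags.length then
    if ner_tags[j] = "I-" ++ etype then
      spanA tokens ner_tags etype (ws ++ [PySem.List.pyGetD tokens (j : Int) ""]) (j + 1)
    else (ws, j)
  else (ws, j)
termination_by ner_tags.length - j

-- the outer while needs i = j ≥ old i + 1 to terminate; cited by extractA's decreasing_by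
theorem spanA_le (tokens ner_tags : List String) (etype : String) (ws : List String) (j : Nat) :
    j ≤ (spanA tokens ner_tags etype ws j).2 := by
  fun_induction spanA <;> simp_all
  omega

-- Outer while loop of A.
def extractA (tokens ner_tags : List String) (acc : List (String × String)) (i : Nat) : List (String × String) :=
  if h : i < ner_tags.length then
    if PySem.Str.startswith ner_tags[i] "B-" then
      let etype := PySem.Str.slice ner_tags[i] (some 2) none
      let sp := spanA tokens ner_tags etype [PySem.List.pyGetD tokens (i : Int) ""] (i + 1)
      extractA tokens ner_tags (acc ++ [(PySem.Str.join " " sp.1, etype)]) sp.2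
    else extractA tokens ner_tags acc (i + 1)
  else acc
termination_by ner_tags.length - i
decreasing_by
  · have := spanA_le tokens ner_tags (PySem.Str.slice ner_tags[i] (some 2) none)
      [PySem.List.pyGetD tokens (i : Int) ""] (i + 1)
    omega
  · omega

-- A's tail: `if not entities … text[:500] … entities[:10] …` and the two prompt formats.
def renderA (text : String) (entities : List (String × String)) : Option String :=
  if entities.isEmpty then none
  else
    let text := PySem.Str.slice text none (some 500)
    let ents := PySem.List.slice entities none (some 10)
    if ents.length = 1 then
      let ne := ents.headD ("", "")
      some ("Sentence: \"" ++ text ++ "\"\nThe phrase \"" ++ ne.1 ++ "\" is tagged as entity type "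
        ++ ne.2 ++ ".\nIs this entity type correct? Answer only: correct or incorrect.")
    else
      let ent_list := PySem.Str.join ", " (ents.map (fun p => "\"" ++ p.1 ++ "\" -> " ++ p.2))
      some ("Sentence: \"" ++ text ++ "\"\nEntities: " ++ ent_list
        ++ "\nAre all entity labels correct? Answer only: correct or incorrect.")

def build_ner_prompt (text : String) (tokens : List String) (ner_tags : List String) : Option String :=
  renderA text (extractA tokens ner_tags [] 0)

-- ===== PORT B =====
-- One step of Source B's for-loop: state = (open entity (cur_type, cur_tokens) or none, entities so far).
def stepB (tokens : List String) (st : Option (String × List String) × List (String × String))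
    (p : Int × String) : Option (String × List String) × List (String × String) :=
  if PySem.Str.startswith p.2 "B-" then
    (some (PySem.Str.slice p.2 (some 2) none, [PySem.List.pyGetD tokens p.1 ""]),
     match st.1 with
     | some c => st.2 ++ [(PySem.Str.join " " c.2, c.1)]
     | none => st.2)
  else
    match st.1 with
    | some c =>
      if p.2 = "I-" ++ c.1 then (some (c.1, c.2 ++ [PySem.List.pyGetD tokens p.1 ""]), st.2)
      else (none, st.2 ++ [(PySem.Str.join " " c.2, c.1)])
    | none => (none, st.2)

-- Source B's trailing `if cur_type is not None: entities.append(...)`.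
def flushB (st : Option (String × List String) × List (String × String)) : List (String × String) :=
  match st.1 with
  | some c => st.2 ++ [(PySem.Str.join " " c.2, c.1)]
  | none => st.2

-- Source B's tail (identical text to A's).
def renderB (text : String) (entities : List (String × String)) : Option String :=
  if entities.isEmpty then none
  else
    let text := PySem.Str.slice text none (some 500)
    let ents := PySem.List.slice entities none (some 10)
    if ents.length = 1 then
      let ne := ents.headD ("", "")
      some ("Sentence: \"" ++ text ++ "\"\nThe phrase \"" ++ ne.1 ++ "\" is tagged as entity type "
        ++ ne.2 ++ ".\nIs this entity type correct? Answer only: correct or incorrect.")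
    else
      let ent_list := PySem.Str.join ", " (ents.map (fun p => "\"" ++ p.1 ++ "\" -> " ++ p.2))
      some ("Sentence: \"" ++ text ++ "\"\nEntities: " ++ ent_list
        ++ "\nAre all entity labels correct? Answer only: correct or incorrect.")

def build_ner_prompt_alt (text : String) (tokens : List String) (ner_tags : List String) : Option String :=
  renderB text (flushB (List.foldl (stepB tokens) (none, []) (PySem.List.enumerate ner_tags 0)))

-- ===== PRECONDITION & SPEC =====
-- A (and B) read tokens[j] exactly at the indices j where ner_tags[j] starts a B- entity or
-- continues an unbroken I- chain from a matching B-; Python raises IndexError iff such a j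
-- is ≥ len(tokens). Pre_ admits exactly the inputs on which Python A returns normally.
def Pre_build_ner_prompt (text : String) (tokens : List String) (ner_tags : List String) : Prop :=
  ∀ j < ner_tags.length,
    (PySem.Str.startswith (ner_tags.getD j "") "B-" = true ∨
     (PySem.Str.startswith (ner_tags.getD j "") "I-" = true ∧
      ∃ k < j, ner_tags.getD k "" = "B-" ++ PySem.Str.slice (ner_tags.getD j "") (some 2) none ∧
        ∀ m < j, k < m → ner_tags.getD m "" = ner_tags.getD j "")) →
    j < tokens.length

instance (text : String) (tokens : List String) (ner_tags : List String) : Decidable (Pre_build_ner_prompt text tokens ner_tags) := by unfold Pre_build_ner_prompt; infer_instance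

def pvWitness_build_ner_prompt : String × List String × List String :=
  ("The capital is Paris.", ["Paris", "is", "nice"], ["B-LOC", "O", "O"])

def Spec_build_ner_prompt (text : String) (tokens : List String) (ner_tags : List String) (out : Option String) : Prop := out = build_ner_prompt_alt text tokens ner_tags
instance (text : String) (tokens : List String) (ner_tags : List String) (out : Option String) : Decidable (Spec_build_ner_prompt text tokens ner_tags out) := by unfold Spec_build_ner_prompt; infer_instance

-- ===== CLAIM (what is proved, stated in full; the proofs are below) =====
def Claim_equal_build_ner_prompt : Prop := ∀ (text : String) (tokens : List String) (ner_tags : List String), Dom_build_ner_prompt text tokens ner_tags → Pre_build_ner_prompt text tokens ner_tags → Spec_build_ner_prompt text tokens ner_tags (build_ner_prompt text tokens ner_tags)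

-- ===== LEMMAS AND PROOFS =====

theorem renderA_eq_renderB (t : String) (e : List (String × String)) : renderA t e = renderB t e := rfl

-- a tag that starts with "B-" is never "I-" ++ s
theorem ne_I_of_startswith_B (tg s : String)
    (h : PySem.Chars.startswith tg.toList ['B', '-'] = true) : tg ≠ "I-" ++ s := by
  intro he; subst he
  simp [String.toList_append, PySem.Chars.startswith, List.isPrefixOf] at h

-- an "I-…" tag never starts with "B-"
theorem startswith_I_B_false (cs : List Char) :
    PySem.Chars.startswith ('I' :: '-' :: cs) ['B', '-'] = false := by
  simp [PySem.Chars.startswith, List.isPrefixOf]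

-- what A still produces from intermediate state (cur, acc) at position i
def contA (tokens ner_tags : List String) (cur : Option (String × List String))
    (acc : List (String × String)) (i : Nat) : List (String × String) :=
  match cur with
  | none => extractA tokens ner_tags acc i
  | some c =>
    let sp := spanA tokens ner_tags c.1 c.2 i
    extractA tokens ner_tags (acc ++ [(PySem.Str.join " " sp.1, c.1)]) sp.2

-- loop invariant: B's fold over the remaining enumerated tags computes A's continuation
theorem comb (tokens ner_tags : List String) : ∀ (n i : Nat)
    (cur : Option (String × List String)) (acc : List (String × String)),
    ner_tags.length - i = n →
    flushB (List.foldl (stepB tokens) (cur, acc) (PySem.List.enumerate (ner_tags.drop i) (i : Int)))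
      = contA tokens ner_tags cur acc i := by
  intro n
  induction n with
  | zero =>
    intro i cur acc hn
    have hge : ner_tags.length ≤ i := by omega
    rw [List.drop_eq_nil_of_le hge, PySem.List.enumerate_nil, List.foldl_nil]
    cases cur with
    | none => simp [contA, flushB, extractA, Nat.not_lt.mpr hge]
    | some c => simp [contA, flushB, spanA, extractA, Nat.not_lt.mpr hge]
  | succ n ih =>
    intro i cur acc hn
    have hi : i < ner_tags.length := by omega
    rw [List.drop_eq_getElem_cons hi, PySem.List.enumerate_cons, List.foldl_cons]
    have hcast : ((i : Int) + 1) = ((i + 1 : Nat) : Int) := by push_cast; ring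
    rw [hcast]
    by_cases hb : PySem.Str.startswith ner_tags[i] "B-" = true
    · -- B- tag: (possibly flush), open a new entity
      have hb' : PySem.Chars.startswith ner_tags[i].toList ['B', '-'] = true := by simpa using hb
      cases cur with
      | none =>
        rw [show stepB tokens (none, acc) ((i : Int), ner_tags[i])
              = (some (PySem.Str.slice ner_tags[i] (some 2) none,
                  [PySem.List.pyGetD tokens (i : Int) ""]), acc) by simp [stepB, hb']]
        rw [ih (i + 1) _ acc (by omega)]
        simp only [contA]
        conv_rhs => rw [extractA]
        simp [hi, hb']
      | some c =>
        rw [show stepB tokens (some c, acc) ((i : Int), ner_tags[i])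
              = (some (PySem.Str.slice ner_tags[i] (some 2) none,
                  [PySem.List.pyGetD tokens (i : Int) ""]),
                 acc ++ [(PySem.Str.join " " c.2, c.1)]) by simp [stepB, hb']]
        rw [ih (i + 1) _ _ (by omega)]
        have hne : ner_tags[i] ≠ "I-" ++ c.1 := ne_I_of_startswith_B _ _ hb'
        simp only [contA]
        rw [show spanA tokens ner_tags c.1 c.2 i = (c.2, i) by
              rw [spanA]; simp [hi, hne]]
        conv_rhs => rw [extractA]
        simp [hi, hb']
    · -- not a B- tag
      have hb' : PySem.Chars.startswith ner_tags[i].toList ['B', '-'] = false := by simpa using hb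
      cases cur with
      | none =>
        rw [show stepB tokens (none, acc) ((i : Int), ner_tags[i]) = (none, acc) by
              simp [stepB, hb']]
        rw [ih (i + 1) _ acc (by omega)]
        simp only [contA]
        conv_rhs => rw [extractA]
        simp [hi, hb']
      | some c =>
        by_cases hI : ner_tags[i] = "I-" ++ c.1
        · rw [show stepB tokens (some c, acc) ((i : Int), ner_tags[i])
                = (some (c.1, c.2 ++ [PySem.List.pyGetD tokens (i : Int) ""]), acc) by
                simp [stepB, hI, String.toList_append, startswith_I_B_false]]
          rw [ih (i + 1) _ acc (by omega)]
          simp only [contA]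
          rw [show spanA tokens ner_tags c.1 c.2 i
                = spanA tokens ner_tags c.1 (c.2 ++ [PySem.List.pyGetD tokens (i : Int) ""]) (i + 1) by
                conv_lhs => rw [spanA]
                simp [hi, hI]]
        · rw [show stepB tokens (some c, acc) ((i : Int), ner_tags[i])
                = (none, acc ++ [(PySem.Str.join " " c.2, c.1)]) by simp [stepB, hb', hI]]
          rw [ih (i + 1) _ _ (by omega)]
          simp only [contA]
          rw [show spanA tokens ner_tags c.1 c.2 i = (c.2, i) by
                rw [spanA]; simp [hi, hI]]
          conv_rhs => rw [extractA]
          simp [hi, hb']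

-- ===== VERDICT (by name: the statement is the Claim_ definition above) =====
theorem build_ner_prompt_spec : Claim_equal_build_ner_prompt := by
  intro text tokens ner_tags _ _
  unfold Spec_build_ner_prompt build_ner_prompt build_ner_prompt_alt
  have h := comb tokens ner_tags ner_tags.length 0 none [] (by omega)
  rw [List.drop_zero] at h
  simp only [Nat.cast_zero] at h
  rw [h, renderA_eq_renderB]
  rfl
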